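-- pv_equiv track=rewrite | github.com/britlovefan/DecisionTree | modules/ID3.py | split_on_numerical
-- ===== SOURCE A (Python) =====
-- def split_on_numerical(data_set, attribute, splitting_value):
--     '''
--     ========================================================================================================
--     Input:  Takes in a data set, the index for a numeric attribute, splitting value from gain_ratio
--     ========================================================================================================
--     Job:    Categorizes data_set into a list that is greater than or equal to the splitting value and lower.
--     Job: Splits data_set into a tuple of two lists.  The first list contains the examples for which the given
--     attribute has value less than the splitting value, the second list contains the other examples
--     ========================================================================================================
--     Output: Data less than splitting value and data that is equal to or greater than the splitting value
--     ========================================================================================================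
--     '''
--     gt = [idx for idx, value in enumerate([row[attribute] >= splitting_value for row in data_set]) if value]
--     lt = [idx for idx, value in enumerate([row[attribute] < splitting_value for row in data_set]) if value]
--     split = [[],[]]
--     for row in lt:
--         split[0].append(data_set[row])
--     for row in gt:
--         split[1].append(data_set[row])
--     return (split[0],split[1])
-- ===== SOURCE B (Python) =====
-- def split_on_numerical(data_set, attribute, splitting_value):
--     less, ge = [], []
--     for row in data_set:
--         if row[attribute] < splitting_value:
--             less.append(row)
--         elif row[attribute] >= splitting_value:
--             ge.append(row)
--     return (less, ge)
-- ===== Notes on version B (the rewrite author's own statement) =====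
-- stated objective: simpler
-- what changed: One direct partitioning pass appending each row to the 'less' or 'ge' list, replacing A's boolean-flag lists, enumerate index tables and index-gather loops.
import Mathlib
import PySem

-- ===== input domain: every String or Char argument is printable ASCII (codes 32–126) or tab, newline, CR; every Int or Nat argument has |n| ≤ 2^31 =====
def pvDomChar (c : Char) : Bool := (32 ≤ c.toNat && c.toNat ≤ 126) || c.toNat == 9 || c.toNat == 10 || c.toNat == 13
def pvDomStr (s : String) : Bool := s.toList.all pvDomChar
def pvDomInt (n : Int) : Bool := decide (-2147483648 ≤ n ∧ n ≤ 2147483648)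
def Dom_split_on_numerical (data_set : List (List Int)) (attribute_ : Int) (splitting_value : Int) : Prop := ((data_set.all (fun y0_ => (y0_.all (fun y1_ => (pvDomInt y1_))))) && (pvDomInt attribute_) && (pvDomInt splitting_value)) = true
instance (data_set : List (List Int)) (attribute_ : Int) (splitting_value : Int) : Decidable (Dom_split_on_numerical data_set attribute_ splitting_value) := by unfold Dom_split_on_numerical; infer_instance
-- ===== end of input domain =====

-- B replaces A's boolean-flag lists / enumerate index tables / index-gather loops with one
-- direct partitioning pass over the rows (objective: simpler). Return-value equivalence on Pre_.

-- ===== PORT A =====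
-- row[attribute] is ported as pyGetD (exact under Pre_, which guarantees the index is in range)
def split_on_numerical (data_set : List (List Int)) (attribute_ : Int) (splitting_value : Int) : List (List Int) × List (List Int) :=
  let gt := (PySem.List.enumerate (data_set.map (fun row => decide (PySem.List.pyGetD row attribute_ 0 ≥ splitting_value))) 0).foldl
      (fun acc p => if p.2 then acc ++ [p.1] else acc) []
  let lt := (PySem.List.enumerate (data_set.map (fun row => decide (PySem.List.pyGetD row attribute_ 0 < splitting_value))) 0).foldl
      (fun acc p => if p.2 then acc ++ [p.1] else acc) []
  let split0 := lt.foldl (fun acc r => acc ++ [PySem.List.pyGetD data_set r []]) []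
  let split1 := gt.foldl (fun acc r => acc ++ [PySem.List.pyGetD data_set r []]) []
  (split0, split1)

-- ===== PORT B =====
def split_on_numerical_alt (data_set : List (List Int)) (attribute_ : Int) (splitting_value : Int) : List (List Int) × List (List Int) :=
  data_set.foldl
    (fun acc row =>
      if PySem.List.pyGetD row attribute_ 0 < splitting_value then (acc.1 ++ [row], acc.2)
      else if PySem.List.pyGetD row attribute_ 0 ≥ splitting_value then (acc.1, acc.2 ++ [row])
      else acc)
    ([], [])

-- ===== PRECONDITION & SPEC =====
-- Pre_ excludes exactly the inputs where Python A raises IndexError (some row too short for the attribute index)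
def Pre_split_on_numerical (data_set : List (List Int)) (attribute_ : Int) (splitting_value : Int) : Prop :=
  ∀ row ∈ data_set, PySem.Raise.InRange row.length attribute_
instance (data_set : List (List Int)) (attribute_ : Int) (splitting_value : Int) : Decidable (Pre_split_on_numerical data_set attribute_ splitting_value) := by unfold Pre_split_on_numerical; infer_instance
def pvWitness_split_on_numerical : List (List Int) × Int × Int := ([[1, 5], [3, 2], [2, 7]], 1, 5)
def Spec_split_on_numerical (data_set : List (List Int)) (attribute_ : Int) (splitting_value : Int) (out : List (List Int) × List (List Int)) : Prop := out = split_on_numerical_alt data_set attribute_ splitting_value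
instance (data_set : List (List Int)) (attribute_ : Int) (splitting_value : Int) (out : List (List Int) × List (List Int)) : Decidable (Spec_split_on_numerical data_set attribute_ splitting_value out) := by unfold Spec_split_on_numerical; infer_instance

-- ===== CLAIM (what is proved, stated in full; the proofs are below) =====
def Claim_equal_split_on_numerical : Prop := ∀ (data_set : List (List Int)) (attribute_ : Int) (splitting_value : Int), Dom_split_on_numerical data_set attribute_ splitting_value → Pre_split_on_numerical data_set attribute_ splitting_value → Spec_split_on_numerical data_set attribute_ splitting_value (split_on_numerical data_set attribute_ splitting_value)

-- ===== LEMMAS AND PROOFS =====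

-- gathering data_set[i] over the kept indices of the enumerated flag list is just a filter
theorem pv_gather (p : List Int → Bool) (ds pre : List (List Int)) :
    ((((PySem.List.enumerate (ds.map p) (pre.length : Int)).filter (·.2)).map (·.1)).map
      (fun i => PySem.List.pyGetD (pre ++ ds) i [])) = ds.filter p := by
  induction ds generalizing pre with
  | nil => simp [PySem.List.enumerate_nil]
  | cons d ds ih =>
    have hset : pre ++ d :: ds = (pre ++ [d]) ++ ds := by simp
    have hlen : (pre.length : Int) + 1 = (((pre ++ [d]).length : Int)) := by simp
    have ihd := ih (pre ++ [d])
    rw [List.map_cons, PySem.List.enumerate_cons, hlen, hset]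
    by_cases hp : p d = true
    · have hget : PySem.List.pyGetD ((pre ++ [d]) ++ ds) ((pre.length : Int)) [] = d := by
        have he : ((pre ++ [d]) ++ ds) = pre ++ d :: ds := by simp
        rw [he, PySem.List.pyGetD_natCast]
        simp [List.getD]
      simp only [List.filter_cons, hp, if_true, List.map_cons, hget, ihd]
    · simp only [List.filter_cons, hp, Bool.false_eq_true, if_false, ihd]

-- B's single pass accumulates the two filters
theorem pv_alt_foldl (att v : Int) (ds : List (List Int)) (acc : List (List Int) × List (List Int)) :
    ds.foldl
      (fun acc row =>
        if PySem.List.pyGetD row att 0 < v then (acc.1 ++ [row], acc.2)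
        else if PySem.List.pyGetD row att 0 ≥ v then (acc.1, acc.2 ++ [row])
        else acc)
      acc
    = (acc.1 ++ ds.filter (fun row => decide (PySem.List.pyGetD row att 0 < v)),
       acc.2 ++ ds.filter (fun row => decide (PySem.List.pyGetD row att 0 ≥ v))) := by
  induction ds generalizing acc with
  | nil => simp
  | cons d ds ih =>
    simp only [List.foldl_cons, List.filter_cons]
    rcases lt_or_ge (PySem.List.pyGetD d att 0) v with h | h
    · have h2 : ¬ (PySem.List.pyGetD d att 0 ≥ v) := not_le.mpr h
      rw [if_pos h, ih]
      simp [h, h2]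
    · have h2 : ¬ (PySem.List.pyGetD d att 0 < v) := not_lt.mpr h
      rw [if_neg h2, if_pos h, ih]
      simp [h, h2]

-- ===== VERDICT (by name: the statement is the Claim_ definition above) =====
theorem split_on_numerical_spec : Claim_equal_split_on_numerical := by
  intro ds att v _ _
  unfold Spec_split_on_numerical split_on_numerical split_on_numerical_alt
  rw [pv_alt_foldl]
  simp only [PySem.List.foldl_append_if (fun p : Int × Bool => p.2) (fun p : Int × Bool => p.1),
    PySem.List.foldl_append_singleton_eq_map, List.nil_append]
  have hlt := pv_gather (fun row => decide (PySem.List.pyGetD row att 0 < v)) ds []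
  have hgt := pv_gather (fun row => decide (PySem.List.pyGetD row att 0 ≥ v)) ds []
  simp only [List.length_nil, Nat.cast_zero, List.nil_append] at hlt hgt
  rw [hlt, hgt]
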